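-- pv_equiv track=rewrite | github.com/daliaaaaaaa/RCR | TP5/autre_exemple_sémantique.py | infer_properties
-- ===== SOURCE A (Python) =====
-- def infer_properties(concept, inheritance_links, properties):
--     inherited = set(properties.get(concept, []))
--     current = concept
--     while current in inheritance_links:
--         parent = inheritance_links[current]
--         inherited.update(properties.get(parent, []))
--         current = parent
--     return inherited
-- ===== SOURCE B (Python) =====
-- def infer_properties(concept, inheritance_links, properties):
--     # Fixpoint saturation: repeatedly sweep ALL links, collecting every concept
--     # whose properties are inherited, until a full sweep adds nothing; then take
--     # the union of the property lists of the collected concepts.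
--     members = [concept]
--     changed = True
--     while changed:
--         changed = False
--         for child, parent in inheritance_links.items():
--             if child in members and parent not in members:
--                 members.append(parent)
--                 changed = True
--     inherited = set()
--     for m in members:
--         inherited.update(properties.get(m, []))
--     return inherited
-- ===== Notes on version B (the rewrite author's own statement) =====
-- stated objective: alternative
-- what changed: B replaces A's pointer-chasing walk up the chain by a fixpoint saturation: it repeatedly sweeps the whole link table, collecting every parent of an already-collected concept until a sweep adds nothing, then unions the property lists of the collected concepts; Pre_ excludes cyclic inheritance reachable from concept, where A's while loop never returns (B terminates there).
import Mathlib
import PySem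

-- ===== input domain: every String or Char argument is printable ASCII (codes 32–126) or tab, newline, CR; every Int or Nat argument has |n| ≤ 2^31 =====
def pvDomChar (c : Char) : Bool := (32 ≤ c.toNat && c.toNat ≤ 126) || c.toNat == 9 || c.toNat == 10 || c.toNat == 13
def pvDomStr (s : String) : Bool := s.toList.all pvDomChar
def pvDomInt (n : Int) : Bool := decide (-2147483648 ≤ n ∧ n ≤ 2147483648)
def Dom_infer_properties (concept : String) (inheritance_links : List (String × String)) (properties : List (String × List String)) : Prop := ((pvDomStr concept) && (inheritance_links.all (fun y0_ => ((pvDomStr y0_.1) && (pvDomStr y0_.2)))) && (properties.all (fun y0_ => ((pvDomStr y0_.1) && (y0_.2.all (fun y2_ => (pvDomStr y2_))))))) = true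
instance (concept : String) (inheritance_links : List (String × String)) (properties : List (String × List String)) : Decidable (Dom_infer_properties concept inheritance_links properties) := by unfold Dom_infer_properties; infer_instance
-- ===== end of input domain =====

-- B replaces A's pointer-chasing walk by a fixpoint saturation over the whole link table (alternative algorithm, similar cost); Pre_ excludes cyclic inheritance reachable from concept, where Python A's while loop never returns.


-- ===== PORT A =====
-- A's while loop: walk parent links from `current`, accumulating inherited properties.
-- Fuel links.length+1 bounds every terminating run (the walk visits pairwise distinct keys);
-- on cyclic inputs Python's loop never returns and nothing is claimed (see Pre_).
def inferLoopA (links : List (String × String)) (props : List (String × List String)) :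
    Nat → String → PySem.Set String → PySem.Set String
  | 0, _, inherited => inherited
  | fuel + 1, current, inherited =>
    match PySem.Dict.get? (PySem.Dict.mk links) current with
    | none => inherited
    | some parent =>
        inferLoopA links props fuel parent
          (PySem.Set.update inherited (PySem.Dict.getD (PySem.Dict.mk props) parent []))

def infer_properties (concept : String) (inheritance_links : List (String × String)) (properties : List (String × List String)) : List String :=
  inferLoopA inheritance_links properties (inheritance_links.length + 1) concept
    (PySem.Set.ofList (PySem.Dict.getD (PySem.Dict.mk properties) concept []))

-- ===== PORT B =====
-- One sweep of B's inner `for child, parent in inheritance_links.items()` loop.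
def pvSweep (links : List (String × String)) (st : List String × Bool) : List String × Bool :=
  links.foldl
    (fun st cp => if st.1.contains cp.1 && !(st.1.contains cp.2) then (st.1 ++ [cp.2], true) else st)
    st

-- B's outer `while changed` loop. Every changed sweep appends at least one new member and
-- members stay inside {concept} ∪ parents, so there are at most links.length changed sweeps
-- on ANY input: fuel links.length+1 covers every run of the Python loop.
def pvSaturate (links : List (String × String)) : Nat → List String → List String
  | 0, members => members
  | fuel + 1, members =>
      let st := pvSweep links (members, false)
      if st.2 then pvSaturate links fuel st.1 else st.1

def infer_properties_alt (concept : String) (inheritance_links : List (String × String)) (properties : List (String × List String)) : List String :=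
  let members := pvSaturate inheritance_links (inheritance_links.length + 1) [concept]
  members.foldl
    (fun inherited m => PySem.Set.update inherited (PySem.Dict.getD (PySem.Dict.mk properties) m []))
    PySem.Set.empty

-- ===== PRECONDITION & SPEC =====
-- First-match lookup in an association list (what Python's dict lookup is on these inputs).
def pvLookup (l : List (String × String)) (x : String) : Option String :=
  match l with
  | [] => none
  | (k, v) :: rest => if k = x then some v else pvLookup rest x

-- The parent walk from x, each used link erased so that the walk is finite even on cyclic
-- input (it then stops at the first revisited key — which still HAS a link in the full list,
-- so Pre_'s escape condition below detects the cycle). The Nat argument is l.length, which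
-- strictly bounds the erasures, not a simulation budget of A's loop.
def pvChainF : Nat → List (String × String) → String → List String
  | 0, _, x => [x]
  | n + 1, l, x =>
      match pvLookup l x with
      | none => [x]
      | some p => x :: pvChainF n (l.erase (x, p)) p

def pvChain (l : List (String × String)) (x : String) : List String :=
  pvChainF l.length l x

-- Pre_ excludes (i) association lists with duplicate keys — they do not arise from a Python
-- dict argument — and (ii) cyclic inheritance reachable from concept, on which Python A's
-- while loop never returns: it holds iff the key list is duplicate-free and the parent walk
-- from concept ends at a concept that has no inheritance link.
def Pre_infer_properties (concept : String) (inheritance_links : List (String × String)) (properties : List (String × List String)) : Prop :=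
  (inheritance_links.map Prod.fst).Nodup ∧
  ((pvChain inheritance_links concept).getLast?).all
    (fun y => (pvLookup inheritance_links y).isNone) = true
instance (concept : String) (inheritance_links : List (String × String)) (properties : List (String × List String)) : Decidable (Pre_infer_properties concept inheritance_links properties) := by unfold Pre_infer_properties; infer_instance

def pvWitness_infer_properties : String × (List (String × String)) × (List (String × List String)) :=
  ("a", [("a", "b"), ("b", "c")], [("a", ["p1"]), ("b", ["p2"]), ("c", ["p3", "p1"])])

def Spec_infer_properties (concept : String) (inheritance_links : List (String × String)) (properties : List (String × List String)) (out : List String) : Prop := out = infer_properties_alt concept inheritance_links properties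
instance (concept : String) (inheritance_links : List (String × String)) (properties : List (String × List String)) (out : List String) : Decidable (Spec_infer_properties concept inheritance_links properties out) := by unfold Spec_infer_properties; infer_instance

-- ===== CLAIM (what is proved, stated in full; the proofs are below) =====
def Claim_equal_infer_properties : Prop := ∀ (concept : String) (inheritance_links : List (String × String)) (properties : List (String × List String)), Dom_infer_properties concept inheritance_links properties → Pre_infer_properties concept inheritance_links properties → Spec_infer_properties concept inheritance_links properties (infer_properties concept inheritance_links properties)

-- ===== LEMMAS AND PROOFS =====

-- The sweep's loop body, named for the proofs (pvSweep links st = List.foldl pvStep st links).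
def pvStep (st : List String × Bool) (cp : String × String) : List String × Bool :=
  if st.1.contains cp.1 && !(st.1.contains cp.2) then (st.1 ++ [cp.2], true) else st

theorem pvSweep_eq (links : List (String × String)) (st : List String × Bool) :
    pvSweep links st = List.foldl pvStep st links := rfl

theorem dictGet_eq_pvLookup (l : List (String × String)) (x : String) :
    PySem.Dict.get? (PySem.Dict.mk l) x = pvLookup l x := by
  induction l with
  | nil => rfl
  | cons q rest ih =>
      cases q with
      | mk k v =>
          rw [PySem.Dict.get?_mk_cons]
          simp only [pvLookup, beq_iff_eq]
          split <;> simp_all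

theorem pvLookup_mem {l : List (String × String)} {x p : String}
    (h : pvLookup l x = some p) : (x, p) ∈ l := by
  induction l with
  | nil => simp [pvLookup] at h
  | cons q rest ih =>
      simp only [pvLookup] at h
      split at h
      · rename_i hk; cases h; cases q; simp_all
      · exact List.mem_cons_of_mem _ (ih h)

theorem pvLookup_eq_none_iff (l : List (String × String)) (x : String) :
    pvLookup l x = none ↔ x ∉ l.map Prod.fst := by
  induction l with
  | nil => simp [pvLookup]
  | cons q rest ih =>
      cases q
      simp only [pvLookup, List.map_cons, List.mem_cons]
      split
      · simp_all
      · simp_all [eq_comm]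

theorem mem_pvLookup {l : List (String × String)} {a b : String}
    (hnd : (l.map Prod.fst).Nodup) (h : (a, b) ∈ l) : pvLookup l a = some b := by
  induction l with
  | nil => simp at h
  | cons q rest ih =>
      cases q with
      | mk k v =>
          simp only [List.map_cons, List.nodup_cons] at hnd
          rcases List.mem_cons.mp h with h1 | h1
          · cases h1; simp [pvLookup]
          · have hak : ¬ (k = a) := by
              intro heq; subst heq
              exact hnd.1 (List.mem_map.mpr ⟨(k, b), h1, rfl⟩)
            simp only [pvLookup, if_neg hak]
            exact ih hnd.2 h1

theorem pvLookup_erase_ne {l : List (String × String)} {x p a : String} (h : a ≠ x) :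
    pvLookup (l.erase (x, p)) a = pvLookup l a := by
  induction l with
  | nil => rfl
  | cons q rest ih =>
      rw [List.erase_cons]
      split
      · rename_i hq
        have : q = (x, p) := by simpa using hq
        subst this
        simp [pvLookup, (by simpa using h.symm : ¬ (x = a))]
      · cases q with
        | mk k v => simp only [pvLookup]; split <;> simp_all

theorem pvLookup_erase_self {l : List (String × String)} {x p : String}
    (hnd : (l.map Prod.fst).Nodup) (h : pvLookup l x = some p) :
    pvLookup (l.erase (x, p)) x = none := by
  induction l with
  | nil => simp [pvLookup] at h
  | cons q rest ih =>
      cases q with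
      | mk k v =>
          simp only [List.map_cons, List.nodup_cons] at hnd
          simp only [pvLookup] at h
          by_cases hk : k = x
          · subst hk
            rw [if_pos rfl] at h
            cases h
            rw [List.erase_cons_head]
            exact (pvLookup_eq_none_iff rest k).mpr hnd.1
          · rw [if_neg hk] at h
            rw [List.erase_cons_tail (by simp [hk])]
            simp only [pvLookup, if_neg hk]
            exact ih hnd.2 h

theorem keys_erase_nodup {l : List (String × String)} {q : String × String}
    (hnd : (l.map Prod.fst).Nodup) : ((l.erase q).map Prod.fst).Nodup :=
  (List.Sublist.map Prod.fst List.erase_sublist).nodup hnd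

theorem pvLookup_erase_none {l : List (String × String)} {q : String × String} {y : String}
    (h : pvLookup l y = none) : pvLookup (l.erase q) y = none := by
  rw [pvLookup_eq_none_iff] at h ⊢
  exact fun hm => h ((List.Sublist.map Prod.fst List.erase_sublist).mem hm)

theorem pvChain_none {l : List (String × String)} {x : String}
    (h : pvLookup l x = none) : pvChain l x = [x] := by
  unfold pvChain
  cases hl : l.length <;> simp [pvChainF, h]

theorem pvChain_some {l : List (String × String)} {x p : String}
    (h : pvLookup l x = some p) : pvChain l x = x :: pvChain (l.erase (x, p)) p := by
  have hm := pvLookup_mem h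
  have hpos : l.length ≠ 0 := by cases l <;> simp_all [pvLookup]
  obtain ⟨k, hk⟩ : ∃ k, l.length = k + 1 := ⟨l.length - 1, by omega⟩
  have he : (l.erase (x, p)).length = k := by
    rw [List.length_erase_of_mem hm]; omega
  unfold pvChain
  rw [hk, he]
  simp [pvChainF, h]

theorem pvChain_shape (l : List (String × String)) (x : String) :
    ∃ t, pvChain l x = x :: t := by
  cases h : pvLookup l x with
  | none => exact ⟨[], pvChain_none h⟩
  | some p => exact ⟨_, pvChain_some h⟩

-- An element of the walk that has no link (in the full list) is the walk's last element.
theorem pvChain_mem_last_aux (n : Nat) :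
    ∀ (l : List (String × String)) (x : String), l.length ≤ n →
      ∀ a ∈ pvChain l x, pvLookup l a = none → (pvChain l x).getLast? = some a := by
  induction n with
  | zero =>
      intro l x hl a ha hn
      have : l = [] := List.length_eq_zero_iff.mp (Nat.le_zero.mp hl)
      subst this
      rw [pvChain_none rfl] at ha ⊢
      simp_all
  | succ n ih =>
      intro l x hl a ha hn
      cases h : pvLookup l x with
      | none =>
          rw [pvChain_none h] at ha ⊢
          simp at ha
          subst ha
          simp
      | some p =>
          rw [pvChain_some h] at ha ⊢
          rcases List.mem_cons.mp ha with rfl | ha'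
          · rw [hn] at h; cases h
          · have hl' : (l.erase (x, p)).length ≤ n := by
              rw [List.length_erase_of_mem (pvLookup_mem h)]
              omega
            have hres := ih (l.erase (x, p)) p hl' a ha' (pvLookup_erase_none hn)
            rw [List.getLast?_cons, hres]
            rfl

theorem pvChain_mem_last {l : List (String × String)} {x a : String}
    (ha : a ∈ pvChain l x) (hn : pvLookup l a = none) : (pvChain l x).getLast? = some a :=
  pvChain_mem_last_aux l.length l x le_rfl a ha hn

-- Under Pre_'s two conditions the walk is the true parent chain: consecutively linked
-- (in the FULL list) and duplicate-free.
theorem pvChain_spec_aux (n : Nat) :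
    ∀ (l : List (String × String)) (x : String), l.length ≤ n →
      (l.map Prod.fst).Nodup →
      ((pvChain l x).getLast?).all (fun y => (pvLookup l y).isNone) = true →
      List.IsChain (fun a b => pvLookup l a = some b) (pvChain l x) ∧ (pvChain l x).Nodup := by
  induction n with
  | zero =>
      intro l x hl _ _
      have : l = [] := List.length_eq_zero_iff.mp (Nat.le_zero.mp hl)
      subst this
      rw [pvChain_none rfl]
      simp
  | succ n ih =>
      intro l x hl hnd hesc
      cases h : pvLookup l x with
      | none => rw [pvChain_none h]; simp
      | some p =>
          have hm := pvLookup_mem h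
          have hl' : (l.erase (x, p)).length ≤ n := by
            rw [List.length_erase_of_mem hm]; omega
          have hnd' := keys_erase_nodup (q := (x, p)) hnd
          obtain ⟨t, ht⟩ := pvChain_shape (l.erase (x, p)) p
          have hlast : (pvChain l x).getLast? = (pvChain (l.erase (x, p)) p).getLast? := by
            rw [pvChain_some h, List.getLast?_cons, ht, List.getLast?_cons]
            simp
          have hesc' :
              ((pvChain (l.erase (x, p)) p).getLast?).all
                (fun y => (pvLookup (l.erase (x, p)) y).isNone) = true := by
            obtain ⟨y, hy⟩ : ∃ y, (pvChain (l.erase (x, p)) p).getLast? = some y :=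
              ⟨_, by rw [ht, List.getLast?_cons]⟩
            rw [hy]
            rw [hlast, hy] at hesc
            simp only [Option.all_some, Option.isNone_iff_eq_none] at hesc ⊢
            exact pvLookup_erase_none hesc
          obtain ⟨hch', hnd''⟩ := ih (l.erase (x, p)) p hl' hnd' hesc'
          have hup : ∀ a b : String,
              pvLookup (l.erase (x, p)) a = some b → pvLookup l a = some b := by
            intro a b r
            have hax : a ≠ x := by
              rintro rfl
              rw [pvLookup_erase_self hnd h] at r
              cases r
            rw [← pvLookup_erase_ne hax]
            exact r
          have hxnot : x ∉ pvChain (l.erase (x, p)) p := by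
            intro hx
            have hnone : pvLookup (l.erase (x, p)) x = none := pvLookup_erase_self hnd h
            have := pvChain_mem_last hx hnone
            rw [hlast, this] at hesc
            simp only [Option.all_some, Option.isNone_iff_eq_none] at hesc
            rw [hesc] at h
            cases h
          rw [pvChain_some h]
          refine ⟨(hch'.imp hup).cons ?_, ?_⟩
          · intro y hy
            rw [ht] at hy
            simp at hy
            subst hy
            exact h
          · exact List.nodup_cons.mpr ⟨hxnot, hnd''⟩

theorem pvChain_spec {l : List (String × String)} {x : String}
    (hnd : (l.map Prod.fst).Nodup)
    (hesc : ((pvChain l x).getLast?).all (fun y => (pvLookup l y).isNone) = true) :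
    List.IsChain (fun a b => pvLookup l a = some b) (pvChain l x) ∧ (pvChain l x).Nodup :=
  pvChain_spec_aux l.length l x le_rfl hnd hesc

theorem pvChain_length_aux (n : Nat) :
    ∀ (l : List (String × String)) (x : String), l.length ≤ n →
      (pvChain l x).length ≤ l.length + 1 := by
  induction n with
  | zero =>
      intro l x hl
      have : l = [] := List.length_eq_zero_iff.mp (Nat.le_zero.mp hl)
      subst this
      rw [pvChain_none rfl]
      simp
  | succ n ih =>
      intro l x hl
      cases h : pvLookup l x with
      | none => rw [pvChain_none h]; simp
      | some p =>
          have hm := pvLookup_mem h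
          have hpos : 0 < l.length := List.length_pos_of_mem hm
          have hl' : (l.erase (x, p)).length ≤ n := by
            rw [List.length_erase_of_mem hm]; omega
          have := ih (l.erase (x, p)) p hl'
          rw [pvChain_some h, List.length_cons]
          rw [List.length_erase_of_mem hm] at this
          omega

theorem pvChain_length (l : List (String × String)) (x : String) :
    (pvChain l x).length ≤ l.length + 1 :=
  pvChain_length_aux l.length l x le_rfl

-- A's loop along a linked, escaping chain is the fold of the update step over its tail.
theorem loopA_eq (links : List (String × String)) (props : List (String × List String)) :
    ∀ (D : List String) (x : String) (fuel : Nat) (s : PySem.Set String),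
      List.IsChain (fun a b => pvLookup links a = some b) (x :: D) →
      ((x :: D).getLast?).all (fun y => (pvLookup links y).isNone) = true →
      (x :: D).length ≤ fuel + 1 →
      inferLoopA links props fuel x s =
        D.foldl (fun s m => PySem.Set.update s (PySem.Dict.getD (PySem.Dict.mk props) m [])) s := by
  intro D
  induction D with
  | nil =>
      intro x fuel s _ hesc _
      have hx : pvLookup links x = none := by
        simp only [List.getLast?_cons, List.getLast?_nil, Option.getD_none,
          Option.all_some, Option.isNone_iff_eq_none] at hesc
        exact hesc
      cases fuel with
      | zero => rfl
      | succ f =>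
          simp only [inferLoopA, dictGet_eq_pvLookup, hx]
          rfl
  | cons y D' ih =>
      intro x fuel s hch hesc hlen
      rw [List.isChain_cons] at hch
      obtain ⟨hxy, hch'⟩ := hch
      have hxy' : pvLookup links x = some y := hxy y (by simp)
      cases fuel with
      | zero => simp at hlen
      | succ f =>
          simp only [inferLoopA, dictGet_eq_pvLookup, hxy']
          rw [List.foldl_cons]
          apply ih y f _ hch'
          · rw [List.getLast?_cons] at hesc ⊢
            rw [List.getLast?_cons] at hesc
            exact hesc
          · simp only [List.length_cons] at hlen ⊢
            omega

-- Once the changed flag is true it stays true through the rest of the sweep.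
theorem sweep_stays_true :
    ∀ (ps : List (String × String)) (st : List String × Bool), st.2 = true →
      (List.foldl pvStep st ps).2 = true := by
  intro ps
  induction ps with
  | nil => intro st h; exact h
  | cons p ps ih =>
      intro st h
      rw [List.foldl_cons]
      apply ih
      unfold pvStep
      split <;> simp_all

-- A sweep that ends with the flag still false added nothing and found no applicable link.
theorem sweep_false :
    ∀ (ps : List (String × String)) (M : List String),
      (List.foldl pvStep (M, false) ps).2 = false →
      (List.foldl pvStep (M, false) ps).1 = M ∧
        ∀ p ∈ ps, (M.contains p.1 && !(M.contains p.2)) = false := by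
  intro ps
  induction ps with
  | nil => intro M _; exact ⟨rfl, by simp⟩
  | cons p ps ih =>
      intro M h
      rw [List.foldl_cons] at h ⊢
      by_cases hc : (M.contains p.1 && !(M.contains p.2)) = true
      · exfalso
        have : pvStep (M, false) p = (M ++ [p.2], true) := by unfold pvStep; rw [hc]; simp
        rw [this] at h
        rw [sweep_stays_true ps _ rfl] at h
        cases h
      · have hst : pvStep (M, false) p = (M, false) := by
          unfold pvStep
          simp only [Bool.not_eq_true] at hc
          rw [hc]
          simp
        rw [hst] at h ⊢
        obtain ⟨h1, h2⟩ := ih M h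
        refine ⟨h1, ?_⟩
        intro q hq
        rcases List.mem_cons.mp hq with rfl | hq'
        · simpa using hc
        · exact h2 q hq'


-- The sweep carried over a prefix of the chain C ends on a (possibly longer) prefix of C,
-- with the changed flag recording whether it grew.
theorem sweep_take (links : List (String × String)) (C : List String)
    (hndk : (links.map Prod.fst).Nodup)
    (hch : List.IsChain (fun a b => pvLookup links a = some b) C)
    (hnd : C.Nodup)
    (hlast : (C.getLast?).all (fun y => (pvLookup links y).isNone) = true) :
    ∀ (ps : List (String × String)), (∀ q ∈ ps, q ∈ links) →
      ∀ (m : Nat) (flag : Bool), 1 ≤ m → m ≤ C.length →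
        ∃ j, m ≤ j ∧ j ≤ C.length ∧
          List.foldl pvStep (C.take m, flag) ps = (C.take j, flag || decide (m < j)) := by
  intro ps
  induction ps with
  | nil =>
      intro _ m flag h1 h2
      exact ⟨m, le_rfl, h2, by simp⟩
  | cons q ps ih =>
      intro hsub m flag h1 h2
      have hqlinks : q ∈ links := hsub q List.mem_cons_self
      have hsub' : ∀ r ∈ ps, r ∈ links := fun r hr => hsub r (List.mem_cons_of_mem _ hr)
      rw [List.foldl_cons]
      by_cases hc : ((C.take m).contains q.1 && !((C.take m).contains q.2)) = true
      · -- the link fires: members grow from C.take m to C.take (m+1)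
        have hcc : q.1 ∈ C.take m ∧ q.2 ∉ C.take m := by
          simpa [List.contains_iff_mem] using hc
        obtain ⟨hq1, hq2⟩ := hcc
        obtain ⟨i, hi, hCi⟩ := List.mem_iff_getElem.mp hq1
        have him : i < m := by
          have := hi; rw [List.length_take] at this; omega
        have hiC : i < C.length := by
          have := hi; rw [List.length_take] at this; omega
        have hCiq : C[i] = q.1 := by rw [← hCi, List.getElem_take]
        have hlq : pvLookup links q.1 = some q.2 := mem_pvLookup hndk hqlinks
        have hi1 : i + 1 < C.length := by
          by_contra hcon
          have hieq : i = C.length - 1 := by omega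
          subst hieq
          have hlastC : C.getLast? = some C[C.length - 1] := by
            rw [List.getLast?_eq_getElem?, List.getElem?_eq_getElem (by omega : C.length - 1 < C.length)]
          rw [hlastC] at hlast
          simp only [Option.all_some, Option.isNone_iff_eq_none] at hlast
          rw [hCiq, hlq] at hlast
          cases hlast
        have hlink : pvLookup links C[i] = some C[i + 1] :=
          List.isChain_iff_getElem.mp hch i hi1
        have hq2eq : q.2 = C[i + 1] := by
          rw [hCiq, hlq] at hlink
          exact (Option.some.inj hlink)
        have him1 : i + 1 = m := by
          by_contra hne
          have hlt : i + 1 < m := by omega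
          apply hq2
          rw [hq2eq]
          have : (C.take m)[i + 1]'(by rw [List.length_take]; omega) = C[i + 1] :=
            List.getElem_take
          rw [← this]
          exact List.getElem_mem _
        have hmC : m < C.length := by omega
        have happ : C.take m ++ [q.2] = C.take (m + 1) := by
          rw [List.take_succ, List.getElem?_eq_getElem hmC]
          simp [hq2eq, him1]
        have hstep : pvStep (C.take m, flag) q = (C.take (m + 1), true) := by
          unfold pvStep
          rw [hc]
          simp [happ]
        rw [hstep]
        obtain ⟨j, hj1, hj2, hj3⟩ := ih hsub' (m + 1) true (by omega) hmC
        refine ⟨j, by omega, hj2, ?_⟩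
        rw [hj3]
        have h1 : (true || decide (m + 1 < j)) = true := by simp
        have h2 : (flag || decide (m < j)) = true := by
          have : m < j := by omega
          simp [this]
        rw [h1, h2]
      · have hstep : pvStep (C.take m, flag) q = (C.take m, flag) := by
          unfold pvStep
          simp only [Bool.not_eq_true] at hc
          rw [hc]
          simp
        rw [hstep]
        exact ih hsub' m flag h1 h2

-- If a full sweep over links finds no applicable link, the prefix is the whole chain.
theorem sweep_complete (links : List (String × String)) (C : List String)
    (hch : List.IsChain (fun a b => pvLookup links a = some b) C)
    (hnd : C.Nodup) (m : Nat) (h1 : 1 ≤ m) (h2 : m ≤ C.length)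
    (h : ∀ q ∈ links, ((C.take m).contains q.1 && !((C.take m).contains q.2)) = false) :
    m = C.length := by
  by_contra hne
  have hm : m < C.length := by omega
  have hi1 : m - 1 + 1 < C.length := by omega
  have hlink : pvLookup links C[m - 1] = some C[m - 1 + 1] :=
    List.isChain_iff_getElem.mp hch (m - 1) hi1
  have hq : (C[m - 1], C[m - 1 + 1]) ∈ links := pvLookup_mem hlink
  have hcond := h _ hq
  have hmem1 : C[m - 1] ∈ C.take m := by
    have : (C.take m)[m - 1]'(by rw [List.length_take]; omega) = C[m - 1] := List.getElem_take
    rw [← this]; exact List.getElem_mem _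
  have hmem2 : C[m - 1 + 1] ∉ C.take m := by
    intro hin
    obtain ⟨i, hi, hCi⟩ := List.mem_iff_getElem.mp hin
    have him : i < m := by rw [List.length_take] at hi; omega
    have hstep : C[i]'(by omega) = (C.take m)[i]'hi := (List.getElem_take).symm
    have := (hnd.getElem_inj_iff).mp (hstep.trans hCi)
    omega
  rw [(List.contains_iff_mem).mpr hmem1] at hcond
  have : (C.take m).contains C[m - 1 + 1] = false := by
    rw [← Bool.not_eq_true, List.contains_iff_mem]; exact hmem2
  rw [this] at hcond
  simp at hcond

-- B's saturation loop, started on a nonempty prefix of the chain with enough fuel, returns C.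
theorem saturate_eq (links : List (String × String)) (C : List String)
    (hndk : (links.map Prod.fst).Nodup)
    (hch : List.IsChain (fun a b => pvLookup links a = some b) C)
    (hnd : C.Nodup)
    (hlast : (C.getLast?).all (fun y => (pvLookup links y).isNone) = true) :
    ∀ (fuel m : Nat), 1 ≤ m → m ≤ C.length → C.length - m ≤ fuel →
      pvSaturate links fuel (C.take m) = C := by
  intro fuel
  induction fuel with
  | zero =>
      intro m h1 h2 h3
      have : m = C.length := by omega
      subst this
      simp [pvSaturate, List.take_of_length_le le_rfl]
  | succ f ih =>
      intro m h1 h2 h3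
      obtain ⟨j, hj1, hj2, hj3⟩ :=
        sweep_take links C hndk hch hnd hlast links (fun _ hq => hq) m false h1 h2
      show (let st := pvSweep links (C.take m, false); if st.2 then pvSaturate links f st.1 else st.1) = C
      rw [pvSweep_eq, hj3]
      by_cases hmj : m < j
      · simp only [Bool.false_or, decide_eq_true_eq, hmj, decide_true, if_true]
        exact ih j (by omega) hj2 (by omega)
      · have hjm : j = m := by omega
        subst hjm
        simp only [Nat.lt_irrefl, decide_false, Bool.false_or, if_false]
        have hflag : (List.foldl pvStep (C.take j, false) links).2 = false := by
          rw [hj3]; simp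
        obtain ⟨_, hnone⟩ := sweep_false links (C.take j) hflag
        have := sweep_complete links C hch hnd j h1 hj2 hnone
        subst this
        exact List.take_of_length_le le_rfl

-- ===== VERDICT (by name: the statement is the Claim_ definition above) =====
theorem infer_properties_spec : Claim_equal_infer_properties := by
  intro concept links props _ hpre
  obtain ⟨hndk, hesc⟩ := hpre
  obtain ⟨hch, hnd⟩ := pvChain_spec hndk hesc
  have hlen := pvChain_length links concept
  obtain ⟨t, ht⟩ := pvChain_shape links concept
  unfold Spec_infer_properties infer_properties infer_properties_alt
  have hmembers : pvSaturate links (links.length + 1) [concept] = pvChain links concept := by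
    have h1 : (pvChain links concept).take 1 = [concept] := by rw [ht]; rfl
    rw [← h1]
    exact saturate_eq links (pvChain links concept) hndk hch hnd hesc (links.length + 1) 1
      le_rfl (by rw [ht]; simp) (by omega)
  rw [hmembers, ht]
  rw [List.foldl_cons]
  have hA := loopA_eq links props t concept (links.length + 1)
    (PySem.Set.ofList (PySem.Dict.getD (PySem.Dict.mk props) concept []))
    (ht ▸ hch) (ht ▸ hesc) (by rw [← ht]; omega)
  rw [hA]
  congr 1
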